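-- pv_equiv track=rewrite | github.com/D4vidHuang/Alpha_Built | alpha-built-network-profiler/common/utils.py | divide_items_into_buckets
-- ===== SOURCE A (Python) =====
-- from typing import Dict, List, NamedTuple, Tuple
--
-- def divide_items_into_buckets(buckets: List[int], items: List[int]) -> List[Tuple[int, List[int]]]:
--     bucket_len: int = len(buckets)
--     item_len: int = len(items)
--     assert bucket_len <= item_len
--     step: int = item_len // bucket_len
--     ranges: List[Tuple[int, int]] = [(idx * step, min((idx + 1) * step, item_len)) for idx in range(bucket_len)]
--     item_sliced: List[List[int]] = list(map(lambda slice_: items[slice_[0]:slice_[1]], ranges))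
--     return list(zip(buckets, item_sliced))
-- ===== SOURCE B (Python) =====
-- from typing import List, Tuple
--
-- def divide_items_into_buckets(buckets: List[int], items: List[int]) -> List[Tuple[int, List[int]]]:
--     assert len(buckets) <= len(items)
--     step = len(items) // len(buckets)
--     it = iter(items)
--     return [(b, [next(it) for _ in range(step)]) for b in buckets]
-- ===== Notes on version B (the rewrite author's own statement) =====
-- stated objective: simpler
-- what changed: Replaces the range-computation + per-range slicing + zip pipeline by one sequential pass over the buckets that consumes the items stream chunk by chunk.
import Mathlib
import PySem

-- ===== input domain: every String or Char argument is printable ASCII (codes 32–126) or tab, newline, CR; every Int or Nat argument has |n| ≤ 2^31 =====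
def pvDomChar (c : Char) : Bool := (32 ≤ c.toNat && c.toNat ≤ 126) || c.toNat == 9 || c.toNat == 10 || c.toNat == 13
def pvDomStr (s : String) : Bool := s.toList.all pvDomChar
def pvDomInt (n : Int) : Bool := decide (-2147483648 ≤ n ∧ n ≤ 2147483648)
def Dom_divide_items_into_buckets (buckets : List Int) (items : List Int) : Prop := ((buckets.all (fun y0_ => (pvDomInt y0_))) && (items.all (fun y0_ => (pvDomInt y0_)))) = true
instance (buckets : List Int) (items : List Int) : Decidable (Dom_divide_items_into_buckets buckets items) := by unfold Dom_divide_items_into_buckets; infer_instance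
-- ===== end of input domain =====

-- B replaces the range-computation + slicing + zip pipeline of A by one sequential pass
-- consuming the items list chunk by chunk (objective: simpler).
-- ===== PORT A =====
def divide_items_into_buckets (buckets : List Int) (items : List Int) : List (Int × List Int) :=
  let bucket_len : Int := buckets.length
  let item_len : Int := items.length
  let step : Int := PySem.Int.floordiv item_len bucket_len
  let ranges : List (Int × Int) :=
    (PySem.List.pyRange 0 bucket_len 1).map (fun idx => (idx * step, min ((idx + 1) * step) item_len))
  let item_sliced : List (List Int) :=
    ranges.map (fun slice_ => PySem.List.slice items (some slice_.1) (some slice_.2))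
  buckets.zip item_sliced

-- ===== PORT B =====
def divideAltGo (step : Nat) : List Int → List Int → List (Int × List Int)
  | [], _ => []
  | b :: bs, rest => (b, rest.take step) :: divideAltGo step bs (rest.drop step)

def divide_items_into_buckets_alt (buckets : List Int) (items : List Int) : List (Int × List Int) :=
  divideAltGo (items.length / buckets.length) buckets items

-- ===== PRECONDITION & SPEC =====
-- Pre_ excludes exactly the inputs where A raises: empty buckets (ZeroDivisionError)
-- and more buckets than items (AssertionError).
def Pre_divide_items_into_buckets (buckets : List Int) (items : List Int) : Prop :=
  buckets ≠ [] ∧ buckets.length ≤ items.length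
instance (buckets : List Int) (items : List Int) : Decidable (Pre_divide_items_into_buckets buckets items) := by unfold Pre_divide_items_into_buckets; infer_instance

def pvWitness_divide_items_into_buckets : List Int × List Int := ([1, 2], [10, 20, 30])

def Spec_divide_items_into_buckets (buckets : List Int) (items : List Int) (out : List (Int × List Int)) : Prop := out = divide_items_into_buckets_alt buckets items
instance (buckets : List Int) (items : List Int) (out : List (Int × List Int)) : Decidable (Spec_divide_items_into_buckets buckets items out) := by unfold Spec_divide_items_into_buckets; infer_instance

-- ===== CLAIM (what is proved, stated in full; the proofs are below) =====
def Claim_equal_divide_items_into_buckets : Prop := ∀ (buckets : List Int) (items : List Int), Dom_divide_items_into_buckets buckets items → Pre_divide_items_into_buckets buckets items → Spec_divide_items_into_buckets buckets items (divide_items_into_buckets buckets items)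

-- ===== LEMMAS AND PROOFS =====

-- B's loop, characterised as a zip with the chunks named by their index.
theorem divideAltGo_eq_zip (step : Nat) (bs : List Int) (xs : List Int) :
    divideAltGo step bs xs =
      bs.zip ((List.range bs.length).map (fun k => (xs.drop (k * step)).take step)) := by
  induction bs generalizing xs with
  | nil => simp [divideAltGo]
  | cons b bs ih =>
      simp only [divideAltGo, List.length_cons, List.range_succ_eq_map, List.map_cons,
        List.map_map, List.zip_cons_cons, ih (xs.drop step)]
      refine congrArg₂ _ (by simp) (congrArg _ ?_)
      apply List.map_congr_left
      intro k _
      simp [Function.comp, List.drop_drop, Nat.succ_mul, Nat.add_comm]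
theorem divide_items_into_buckets_spec : Claim_equal_divide_items_into_buckets := by
  intro buckets items _ hpre
  obtain ⟨hne, hle⟩ := hpre
  unfold Spec_divide_items_into_buckets divide_items_into_buckets divide_items_into_buckets_alt
  rw [divideAltGo_eq_zip]
  set n := buckets.length with hn
  set L := items.length with hL
  have hn0 : 0 < n := List.length_pos_iff.mpr hne
  set step : Nat := L / n with hstep
  have hfd : PySem.Int.floordiv (L : Int) (n : Int) = (step : Int) := by
    rw [hstep]; exact_mod_cast PySem.Int.floordiv_natCast L n
  simp only [hfd, PySem.List.pyRange_one]
  congr 1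
  have : ((n : Int) - 0).toNat = n := by omega
  rw [this]
  simp only [List.map_map]
  apply List.map_congr_left
  intro k hk
  have hk' : k < n := List.mem_range.mp hk
  have hmul : (k + 1) * step ≤ L := by
    calc (k + 1) * step ≤ n * step := Nat.mul_le_mul_right _ (by omega)
    _ = step * n := Nat.mul_comm _ _
    _ ≤ L := Nat.div_mul_le_self L n
  have e1 : (k : Int) * (step : Int) = ((k * step : Nat) : Int) := by push_cast; ring
  have e2 : min (((k : Int) + 1) * (step : Int)) (L : Int) = (((k + 1) * step : Nat) : Int) := by
    push_cast
    rw [min_eq_left (by exact_mod_cast hmul)]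
  simp only [Function.comp, zero_add, e1, e2, PySem.List.slice_natCast]
  rw [Nat.add_mul, one_mul, Nat.add_sub_cancel_left]
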